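-- pv_equiv track=rewrite | github.com/SvineruS/kpi | 3.1/gks/lab1.py | get_similarity
-- ===== SOURCE A (Python) =====
-- def get_similarity(matrix):
--     def get_rows_similarity(r1, r2):  # подобность 2х отдельных строк
--         return len([1 for i in range(len(r1)) if r1[i] == r2[i]])
--
--     similarity = {}
--     for i1 in range(len(matrix) - 1):  # перебор всех сочитаний (как в теории вероятности) индексов
--         for i2 in range(i1 + 1, len(matrix)):  # как же хорошо что хоть сюда я не засунул List comprehensions лол
--             similarity[i1, i2] = get_rows_similarity(matrix[i1], matrix[i2])
--
--     return similarity
-- ===== SOURCE B (Python) =====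
-- def _bump_pairs(sim, idxs):
--     # peel off the first index and count it against all later ones, then repeat on the rest
--     while idxs:
--         first, idxs = idxs[0], idxs[1:]
--         for other in idxs:
--             sim[first, other] += 1
--
--
-- def get_similarity(matrix):
--     n = len(matrix)
--     sim = {(i1, i2): 0 for i1 in range(n) for i2 in range(i1 + 1, n)}
--     width = 0
--     for row in matrix:
--         width = max(width, len(row))
--     for j in range(width):
--         groups = {}
--         for i, row in enumerate(matrix):
--             if j < len(row):
--                 groups.setdefault(row[j], []).append(i)
--         for idxs in groups.values():
--             _bump_pairs(sim, idxs)
--     return sim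
-- ===== Notes on version B (the rewrite author's own statement) =====
-- stated objective: alternative
-- what changed: A computes each similarity entry by scanning every row pair independently; B transposes the computation: it pre-initializes all pair keys to 0, then walks the columns once, groups row indices by their value in that column via a dict, and increments every pair inside each equal-value group.
import Mathlib
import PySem

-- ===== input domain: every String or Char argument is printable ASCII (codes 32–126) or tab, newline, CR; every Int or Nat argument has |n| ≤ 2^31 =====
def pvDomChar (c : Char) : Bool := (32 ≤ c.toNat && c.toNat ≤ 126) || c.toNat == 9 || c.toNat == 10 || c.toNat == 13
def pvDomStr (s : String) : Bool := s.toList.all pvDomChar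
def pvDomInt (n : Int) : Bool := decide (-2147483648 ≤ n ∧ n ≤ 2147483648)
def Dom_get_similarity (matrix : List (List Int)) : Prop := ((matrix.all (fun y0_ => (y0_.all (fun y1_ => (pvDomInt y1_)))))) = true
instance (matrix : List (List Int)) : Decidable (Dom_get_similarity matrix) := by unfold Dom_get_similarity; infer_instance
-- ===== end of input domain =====

-- B replaces A's row-pair scanning by per-column grouping of equal values (alternative decomposition,
-- same result dict: all pairs (i1,i2) with i1<i2 as keys, number of matching columns as value).

-- ===== PORT A =====
-- len([1 for i in range(len(r1)) if r1[i] == r2[i]]); pyGet? models r2[i] (none = IndexError,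
-- which Python A raises on ragged rows — those inputs are excluded by Pre_).
def get_rows_similarity (r1 r2 : List Int) : Int :=
  PySem.List.len (((PySem.List.pyRange 0 (PySem.List.len r1) 1).filter
    (fun i => PySem.List.pyGet? r1 i == PySem.List.pyGet? r2 i)).map (fun _ => (1 : Int)))

def get_similarity (matrix : List (List Int)) : List (Int × Int × Int) :=
  let similarity : PySem.Dict (Int × Int) Int :=
    (PySem.List.pyRange 0 (PySem.List.len matrix - 1) 1).foldl (fun d i1 =>
      (PySem.List.pyRange (i1 + 1) (PySem.List.len matrix) 1).foldl (fun d i2 =>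
        d.insert (i1, i2)
          (get_rows_similarity (PySem.List.pyGetD matrix i1 []) (PySem.List.pyGetD matrix i2 [])))
        d)
      PySem.Dict.empty
  similarity.items.map (fun p => (p.1.1, p.1.2, p.2))

-- ===== PORT B =====
-- sim[first, other] += 1 ported as modify (the key is always pre-initialized, so Python's
-- KeyError path is unreachable).
def bumpPairs (sim : PySem.Dict (Int × Int) Int) (idxs : List Int) : PySem.Dict (Int × Int) Int :=
  match idxs with
  | [] => sim
  | first :: rest =>
      bumpPairs (rest.foldl (fun d other => d.modify (first, other) 0 (· + 1)) sim) rest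

def get_similarity_alt (matrix : List (List Int)) : List (Int × Int × Int) :=
  let n : Int := PySem.List.len matrix
  let sim0 : PySem.Dict (Int × Int) Int :=
    (PySem.List.pyRange 0 n 1).foldl (fun d i1 =>
      (PySem.List.pyRange (i1 + 1) n 1).foldl (fun d i2 => d.insert (i1, i2) 0) d)
      PySem.Dict.empty
  let width : Int := matrix.foldl (fun w row => max w (PySem.List.len row)) 0
  let simF : PySem.Dict (Int × Int) Int :=
    (PySem.List.pyRange 0 width 1).foldl (fun sim j =>
      let groups : PySem.Dict Int (List Int) :=
        (PySem.List.enumerate matrix 0).foldl (fun g p =>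
          if j < PySem.List.len p.2 then
            g.modify (PySem.List.pyGetD p.2 j 0) [] (· ++ [p.1])
          else g)
          PySem.Dict.empty
      groups.values.foldl (fun s idxs => bumpPairs s idxs) sim)
      sim0
  simF.items.map (fun p => (p.1.1, p.1.2, p.2))

-- ===== PRECONDITION & SPEC =====
-- Pre_ excludes exactly the inputs on which Python A raises IndexError: a row appearing before a
-- strictly shorter row makes A's inner comprehension index past the shorter row's end.
def Pre_get_similarity (matrix : List (List Int)) : Prop :=
  List.Pairwise (fun r s => r.length ≤ s.length) matrix
instance (matrix : List (List Int)) : Decidable (Pre_get_similarity matrix) := by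
  unfold Pre_get_similarity; infer_instance

def pvWitness_get_similarity : List (List Int) := [[1, 2], [3, 2], [1, 2]]

def Spec_get_similarity (matrix : List (List Int)) (out : List (Int × Int × Int)) : Prop :=
  out = get_similarity_alt matrix
instance (matrix : List (List Int)) (out : List (Int × Int × Int)) :
    Decidable (Spec_get_similarity matrix out) := by unfold Spec_get_similarity; infer_instance

-- ===== CLAIM (what is proved, stated in full; the proofs are below) =====
def Claim_equal_get_similarity : Prop :=
  ∀ (matrix : List (List Int)), Dom_get_similarity matrix → Pre_get_similarity matrix →
    Spec_get_similarity matrix (get_similarity matrix)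

-- ===== LEMMAS AND PROOFS =====

def pairsCanon : List Int → List (Int × Int)
  | [] => []
  | x :: g => g.map (fun y => (x, y)) ++ pairsCanon g

def mStep (d : PySem.Dict (Int × Int) Int) (k : Int × Int) : PySem.Dict (Int × Int) Int :=
  d.modify k 0 (· + 1)

lemma bumpPairs_eq (g : List Int) : ∀ sim, bumpPairs sim g = (pairsCanon g).foldl mStep sim := by
  induction g with
  | nil => intro sim; rfl
  | cons x g ih =>
      intro sim
      simp only [bumpPairs, pairsCanon, List.foldl_append, List.foldl_map, ih, mStep]

lemma sum_ite_count {α : Type} (l : List α) (p : α → Prop) [DecidablePred p] :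
    (l.map (fun x => if p x then (1 : Nat) else 0)).sum = l.countP (fun x => decide (p x)) := by
  induction l with
  | nil => rfl
  | cons x l ih =>
      by_cases h : p x <;> simp [h, ih, Nat.add_comm]

lemma count_map_pair (g : List Int) (hnd : g.Nodup) (z x y : Int) :
    (g.map (fun w => (z, w))).count (x, y) = if x = z ∧ y ∈ g then 1 else 0 := by
  rw [List.count_eq_countP, List.countP_map]
  by_cases hx : x = z
  · subst hx
    have he : ((fun q => (q == ((x : Int), (y : Int)) : Bool)) ∘ (fun w => (x, w))) = (fun w => (w == y)) := by
      funext w; by_cases h : w = y <;> simp [h]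
    rw [he, ← List.count_eq_countP]
    by_cases hy : y ∈ g
    · rw [if_pos ⟨rfl, hy⟩]; exact List.count_eq_one_of_mem hnd hy
    · rw [if_neg (by tauto), List.count_eq_zero_of_not_mem hy]
  · rw [if_neg (by tauto), List.countP_eq_zero]
    intro w hw
    simp only [Function.comp_apply, beq_iff_eq, Prod.mk.injEq]
    rintro ⟨h, -⟩; exact hx h.symm

lemma count_pairsCanon (g : List Int) (hg : g.Pairwise (· < ·)) (x y : Int) :
    (pairsCanon g).count (x, y) = if x ∈ g ∧ y ∈ g ∧ x < y then 1 else 0 := by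
  induction g with
  | nil => simp [pairsCanon]
  | cons z g ih =>
      have hz : ∀ w ∈ g, z < w := fun w hw => (List.pairwise_cons.mp hg).1 w hw
      have hg2 := (List.pairwise_cons.mp hg).2
      have hnd : g.Nodup := hg2.imp (fun h => ne_of_lt h)
      have hzz : z ∉ g := fun h => lt_irrefl z (hz z h)
      rw [pairsCanon, List.count_append, ih hg2, count_map_pair g hnd z x y]
      have f1 : (x = z ∧ y ∈ g) → (x ∈ z :: g ∧ y ∈ z :: g ∧ x < y) := by
        rintro ⟨rfl, hy⟩
        exact ⟨List.mem_cons_self, List.mem_cons_of_mem _ hy, hz y hy⟩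
      have f2 : (x ∈ g ∧ y ∈ g ∧ x < y) → (x ∈ z :: g ∧ y ∈ z :: g ∧ x < y) := by
        rintro ⟨h1, h2, h3⟩
        exact ⟨List.mem_cons_of_mem _ h1, List.mem_cons_of_mem _ h2, h3⟩
      have f3 : (x ∈ z :: g ∧ y ∈ z :: g ∧ x < y) → (x = z ∧ y ∈ g) ∨ (x ∈ g ∧ y ∈ g ∧ x < y) := by
        rintro ⟨h1, h2, h3⟩
        rcases List.mem_cons.mp h1 with h | h
        · left; refine ⟨h, ?_⟩
          rcases List.mem_cons.mp h2 with h4 | h4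
          · exfalso; omega
          · exact h4
        · right; refine ⟨h, ?_, h3⟩
          rcases List.mem_cons.mp h2 with h4 | h4
          · exfalso; have := hz x h; omega
          · exact h4
      have f4 : ¬ ((x = z ∧ y ∈ g) ∧ (x ∈ g ∧ y ∈ g ∧ x < y)) := by
        rintro ⟨⟨rfl, -⟩, ⟨hxg2, -, -⟩⟩; exact hzz hxg2
      by_cases hA : x = z ∧ y ∈ g <;> by_cases hB : x ∈ g ∧ y ∈ g ∧ x < y
      · exact absurd ⟨hA, hB⟩ f4
      · rw [if_pos hA, if_neg hB, if_pos (f1 hA)]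
      · rw [if_neg hA, if_pos hB, if_pos (f2 hB)]
      · rw [if_neg hA, if_neg hB,
          if_neg (fun h => (f3 h).elim (fun h4 => hA h4) (fun h4 => hB h4))]

def KL (c n : Int) : List (Int × Int) :=
  (PySem.List.pyRange 0 c 1).flatMap (fun i1 =>
    (PySem.List.pyRange (i1 + 1) n 1).map (fun i2 => (i1, i2)))

lemma mem_KL (c n : Int) (k : Int × Int) :
    k ∈ KL c n ↔ 0 ≤ k.1 ∧ k.1 < c ∧ k.1 < k.2 ∧ k.2 < n := by
  unfold KL
  simp only [List.mem_flatMap, List.mem_map, PySem.List.mem_pyRange_one]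
  constructor
  · rintro ⟨i1, ⟨hi0, hi1⟩, i2, ⟨hlo, hhi⟩, rfl⟩
    exact ⟨hi0, hi1, by omega, hhi⟩
  · rintro ⟨h0, h1, h2, h3⟩
    exact ⟨k.1, ⟨h0, h1⟩, k.2, ⟨by omega, h3⟩, rfl⟩

lemma KL_nodup (c n : Int) : (KL c n).Nodup := by
  unfold KL
  rw [List.nodup_flatMap]
  refine ⟨fun i1 _ => List.Nodup.map (fun a b h => by simpa using congrArg Prod.snd h) (PySem.List.nodup_pyRange_one _ _), ?_⟩
  have hpw := PySem.List.pairwise_lt_pyRange_one 0 c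
  refine hpw.imp ?_
  intro a b hab p hpa hpb
  rcases List.mem_map.mp hpa with ⟨i2, _, rfl⟩
  rcases List.mem_map.mp hpb with ⟨j2, _, h⟩
  have hba : b = a := by simpa using congrArg Prod.fst h
  omega

lemma nested_items (n : Int) (f : Int → Int → Int) : ∀ (m : Nat),
    ((PySem.List.pyRange 0 (m : Int) 1).foldl (fun d i1 =>
      (PySem.List.pyRange (i1 + 1) n 1).foldl (fun d i2 => d.insert (i1, i2) (f i1 i2)) d)
      PySem.Dict.empty).items
    = (KL (m : Int) n).map (fun k => (k, f k.1 k.2)) := by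
  intro m
  induction m with
  | zero =>
      rw [PySem.List.pyRange_one_eq_nil (by norm_num)]
      unfold KL
      rw [PySem.List.pyRange_one_eq_nil (by norm_num)]
      rfl
  | succ m ih =>
      have hcast : ((m + 1 : Nat) : Int) = (m : Int) + 1 := by push_cast; ring
      rw [hcast, PySem.List.pyRange_one_succ_right (by positivity), List.foldl_append]
      rw [List.foldl_cons, List.foldl_nil]
      have hfresh : ∀ a ∈ PySem.List.pyRange ((m : Int) + 1) n 1,
          (((PySem.List.pyRange 0 (m : Int) 1).foldl (fun d i1 =>
            (PySem.List.pyRange (i1 + 1) n 1).foldl (fun d i2 => d.insert (i1, i2) (f i1 i2)) d)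
            PySem.Dict.empty)).contains ((m : Int), a) = false := by
        intro a _
        have hk : (((PySem.List.pyRange 0 (m : Int) 1).foldl (fun d i1 =>
            (PySem.List.pyRange (i1 + 1) n 1).foldl (fun d i2 => d.insert (i1, i2) (f i1 i2)) d)
            PySem.Dict.empty)).keys = KL (m : Int) n := by
          simp only [PySem.Dict.keys, ih, List.map_map]
          simp [Function.comp_def]
        rw [PySem.Dict.contains_eq_decide_mem_keys, hk]
        simp only [decide_eq_false_iff_not]
        intro hmem
        have h2 := (mem_KL _ _ _).mp hmem
        omega
      rw [PySem.Dict.items_foldl_insert_fresh (PySem.List.pyRange ((m : Int) + 1) n 1)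
        (fun i2 => ((m : Int), i2)) (fun i2 => f (m : Int) i2) _ hfresh
        (List.Nodup.map (fun a b h => by simpa using congrArg Prod.snd h) (PySem.List.nodup_pyRange_one _ _))]
      rw [ih]
      unfold KL
      rw [PySem.List.pyRange_one_succ_right (by positivity), List.flatMap_append]
      simp [List.flatMap_cons, List.map_map, Function.comp_def]

def colPairs (matrix : List (List Int)) (j : Int) : List (Int × Int) :=
  ((PySem.List.enumerate matrix 0).filter (fun p => decide (j < PySem.List.len p.2))).map
    (fun p => (PySem.List.pyGetD p.2 j 0, p.1))

def groupsD (matrix : List (List Int)) (j : Int) : PySem.Dict Int (List Int) :=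
  (PySem.List.enumerate matrix 0).foldl (fun g p =>
    if j < PySem.List.len p.2 then g.modify (PySem.List.pyGetD p.2 j 0) [] (· ++ [p.1]) else g)
    PySem.Dict.empty

lemma foldl_group_aux (j : Int) (l : List (Int × List Int)) :
    ∀ d : PySem.Dict Int (List Int),
      l.foldl (fun g p => if j < PySem.List.len p.2 then
          g.modify (PySem.List.pyGetD p.2 j 0) [] (· ++ [p.1]) else g) d
      = ((l.filter (fun p => decide (j < PySem.List.len p.2))).map
          (fun p => (PySem.List.pyGetD p.2 j 0, p.1))).foldl
          (fun d q => d.modify q.1 [] (· ++ [q.2])) d := by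
  induction l with
  | nil => intro d; rfl
  | cons p l ih =>
      intro d
      rw [List.foldl_cons, List.filter_cons]
      by_cases h : j < PySem.List.len p.2
      · rw [if_pos h, if_pos (by simpa [PySem.List.len_eq] using h), List.map_cons, List.foldl_cons]
        exact ih _
      · rw [if_neg h, if_neg (by simpa [PySem.List.len_eq] using h)]
        exact ih d

lemma groupsD_eq (matrix : List (List Int)) (j : Int) :
    groupsD matrix j =
      (colPairs matrix j).foldl (fun d q => d.modify q.1 [] (· ++ [q.2])) PySem.Dict.empty := by
  unfold groupsD colPairs
  exact foldl_group_aux j (PySem.List.enumerate matrix) PySem.Dict.empty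

lemma keys_groupsD (matrix : List (List Int)) (j : Int) :
    (groupsD matrix j).keys = PySem.Set.ofList ((colPairs matrix j).map (·.1)) := by
  rw [groupsD_eq]
  rw [PySem.Dict.keys_foldl_modify_key (colPairs matrix j) (fun q => q.1) []
    (fun _ q => (· ++ [q.2])) PySem.Dict.empty]
  simp [PySem.Dict.keys_empty, PySem.Set.update_nil_left]

lemma nodup_keys_groupsD (matrix : List (List Int)) (j : Int) :
    (groupsD matrix j).keys.Nodup := by
  rw [groupsD_eq]
  exact PySem.Dict.nodup_keys_foldl_modify_key (colPairs matrix j) (fun q => q.1) []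
    (fun _ q => (· ++ [q.2])) PySem.Dict.empty (by simp [PySem.Dict.keys_empty])

lemma getD_groupsD (matrix : List (List Int)) (j v : Int) :
    (groupsD matrix j).getD v [] =
      ((colPairs matrix j).filter (fun q => q.1 == v)).map (·.2) := by
  rw [groupsD_eq]
  rw [PySem.Dict.getD_foldl_modify_append (colPairs matrix j) PySem.Dict.empty v]
  simp [PySem.Dict.getD_empty]

lemma values_groupsD (matrix : List (List Int)) (j : Int) :
    (groupsD matrix j).values =
      (groupsD matrix j).keys.map (fun v => (groupsD matrix j).getD v []) :=
  PySem.Dict.values_eq_map_keys _ (nodup_keys_groupsD matrix j) []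

lemma group_pairwise (matrix : List (List Int)) (j v : Int) :
    (((colPairs matrix j).filter (fun q => q.1 == v)).map (·.2)).Pairwise (· < ·) := by
  rw [List.pairwise_map]
  apply List.Pairwise.filter
  unfold colPairs
  rw [List.pairwise_map]
  apply List.Pairwise.filter
  exact PySem.List.pairwise_lt_enumerate matrix 0

lemma mem_group (matrix : List (List Int)) (j v i : Int) :
    i ∈ ((colPairs matrix j).filter (fun q => q.1 == v)).map (·.2) ↔
      ∃ (k : Nat) (h : k < matrix.length), i = (k : Int) ∧ j < ((matrix[k]'h).length : Int) ∧
        PySem.List.pyGetD (matrix[k]'h) j 0 = v := by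
  unfold colPairs
  simp only [List.mem_map, List.mem_filter, PySem.List.mem_enumerate_iff, PySem.List.len_eq]
  constructor
  · rintro ⟨q, ⟨⟨p, ⟨⟨k, hk, rfl⟩, hlen⟩, rfl⟩, hv⟩, rfl⟩
    refine ⟨k, hk, by simp, by simpa using hlen, by simpa using hv⟩
  · rintro ⟨k, hk, rfl, hlen, hv⟩
    exact ⟨(PySem.List.pyGetD (matrix[k]'hk) j 0, (k : Int)),
      ⟨⟨((0 : Int) + k, matrix[k]'hk), ⟨⟨k, hk, rfl⟩, by simpa using hlen⟩, by simp⟩,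
        by simpa using hv⟩, rfl⟩

def colEvents (matrix : List (List Int)) (j : Int) : List (Int × Int) :=
  (groupsD matrix j).values.flatMap pairsCanon

lemma count_colEvents (matrix : List (List Int)) (jn a b : Nat)
    (ha : a < matrix.length) (hb : b < matrix.length) (hab : a < b) :
    (colEvents matrix (jn : Int)).count ((a : Int), (b : Int)) =
      if jn < (matrix[a]'ha).length ∧ jn < (matrix[b]'hb).length ∧
         (matrix[a]'ha).getD jn 0 = (matrix[b]'hb).getD jn 0 then 1 else 0 := by
  unfold colEvents
  rw [List.count_flatMap, values_groupsD, List.map_map]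
  have hterm : ∀ v ∈ (groupsD matrix (jn : Int)).keys,
      ((List.count ((a : Int), (b : Int)) ∘ pairsCanon) ∘
        (fun v => (groupsD matrix (jn : Int)).getD v [])) v
      = if ((jn < (matrix[a]'ha).length ∧ (matrix[a]'ha).getD jn 0 = v) ∧
            (jn < (matrix[b]'hb).length ∧ (matrix[b]'hb).getD jn 0 = v)) then 1 else 0 := by
    intro v _
    simp only [Function.comp_apply]
    rw [getD_groupsD, count_pairsCanon _ (group_pairwise matrix (jn : Int) v)]
    refine if_congr ?_ rfl rfl
    rw [mem_group, mem_group]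
    constructor
    · rintro ⟨⟨k1, hk1, hak, hlen1, hv1⟩, ⟨k2, hk2, hbk, hlen2, hv2⟩, -⟩
      have e1 : k1 = a := by exact_mod_cast hak.symm
      have e2 : k2 = b := by exact_mod_cast hbk.symm
      subst e1; subst e2
      rw [PySem.List.pyGetD_natCast] at hv1 hv2
      refine ⟨⟨by exact_mod_cast hlen1, by simpa using hv1⟩, by exact_mod_cast hlen2, by simpa using hv2⟩
    · rintro ⟨⟨hlen1, hv1⟩, hlen2, hv2⟩
      refine ⟨⟨a, ha, rfl, by exact_mod_cast hlen1, ?_⟩,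
        ⟨b, hb, rfl, by exact_mod_cast hlen2, ?_⟩, by exact_mod_cast hab⟩
      · rw [PySem.List.pyGetD_natCast]; simpa using hv1
      · rw [PySem.List.pyGetD_natCast]; simpa using hv2
  rw [List.map_congr_left hterm]
  by_cases hc : jn < (matrix[a]'ha).length ∧ jn < (matrix[b]'hb).length ∧
      (matrix[a]'ha).getD jn 0 = (matrix[b]'hb).getD jn 0
  · rcases hc with ⟨h1, h2, h3⟩
    rw [if_pos ⟨h1, h2, h3⟩]
    have hone : ∀ v ∈ (groupsD matrix (jn : Int)).keys,
        (if ((jn < (matrix[a]'ha).length ∧ (matrix[a]'ha).getD jn 0 = v) ∧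
             (jn < (matrix[b]'hb).length ∧ (matrix[b]'hb).getD jn 0 = v)) then 1 else 0)
        = if v = (matrix[a]'ha).getD jn 0 then (1 : Nat) else 0 := by
      intro v _
      refine if_congr ?_ rfl rfl
      constructor
      · rintro ⟨⟨-, hv1⟩, -⟩; exact hv1.symm
      · rintro rfl; exact ⟨⟨h1, rfl⟩, h2, h3.symm⟩
    rw [List.map_congr_left hone, sum_ite_count]
    have hmemA : (a : Int) ∈ ((colPairs matrix (jn : Int)).filter
        (fun q => q.1 == (matrix[a]'ha).getD jn 0)).map (·.2) := by
      rw [mem_group]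
      exact ⟨a, ha, rfl, by exact_mod_cast h1, by rw [PySem.List.pyGetD_natCast]⟩
    rcases List.mem_map.mp hmemA with ⟨q, hq, -⟩
    rcases List.mem_filter.mp hq with ⟨hqc, hqv⟩
    have hmemK : (matrix[a]'ha).getD jn 0 ∈ (groupsD matrix (jn : Int)).keys := by
      rw [keys_groupsD]
      rw [PySem.Set.mem_ofList]
      exact List.mem_map.mpr ⟨q, hqc, by simpa using hqv⟩
    have : (groupsD matrix (jn : Int)).keys.countP
        (fun v => decide (v = (matrix[a]'ha).getD jn 0)) =
        (groupsD matrix (jn : Int)).keys.count ((matrix[a]'ha).getD jn 0) := by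
      rw [List.count_eq_countP]
      apply List.countP_congr
      intro x _
      simp
    rw [this, List.count_eq_one_of_mem (nodup_keys_groupsD matrix (jn : Int)) hmemK]
  · rw [if_neg hc]
    have hzero : ∀ v ∈ (groupsD matrix (jn : Int)).keys,
        (if ((jn < (matrix[a]'ha).length ∧ (matrix[a]'ha).getD jn 0 = v) ∧
             (jn < (matrix[b]'hb).length ∧ (matrix[b]'hb).getD jn 0 = v)) then 1 else 0)
        = (0 : Nat) := by
      intro v _
      rw [if_neg]
      rintro ⟨⟨x1, x2⟩, ⟨y1, y2⟩⟩
      exact hc ⟨x1, y1, by rw [x2, y2]⟩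
    rw [List.map_congr_left hzero]
    simp

lemma count_total (matrix : List (List Int)) (a b : Nat)
    (ha : a < matrix.length) (hb : b < matrix.length) (hab : a < b) :
    ((PySem.List.pyRange 0 (matrix.foldl (fun w row => max w (PySem.List.len row)) 0) 1).flatMap
      (colEvents matrix)).count ((a : Int), (b : Int))
    = (List.range (matrix[a]'ha).length).countP
        (fun i => decide (i < (matrix[b]'hb).length ∧
          (matrix[a]'ha).getD i 0 = (matrix[b]'hb).getD i 0)) := by
  have hW := PySem.List.le_foldl_max_int matrix (fun row => PySem.List.len row) 0
  set W : Int := matrix.foldl (fun w row => max w (PySem.List.len row)) 0 with hWdef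
  have hW0 : (0 : Int) ≤ W := hW.1
  have hWa : ((matrix[a]'ha).length : Int) ≤ W := by
    have := hW.2 (matrix[a]'ha) (List.getElem_mem ha)
    simpa [PySem.List.len_eq] using this
  have hle : (matrix[a]'ha).length ≤ W.toNat := by omega
  rw [List.count_flatMap, PySem.List.pyRange_one]
  simp only [Int.sub_zero, List.map_map]
  have hterm : ∀ jn ∈ List.range W.toNat,
      ((List.count ((a : Int), (b : Int)) ∘ colEvents matrix) ∘ (fun k : Nat => 0 + (k : Int))) jn
      = if (jn < (matrix[a]'ha).length ∧ jn < (matrix[b]'hb).length ∧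
            (matrix[a]'ha).getD jn 0 = (matrix[b]'hb).getD jn 0) then 1 else 0 := by
    intro jn _
    simp only [Function.comp_apply, zero_add]
    exact count_colEvents matrix jn a b ha hb hab
  rw [List.map_congr_left hterm, sum_ite_count]
  rw [show W.toNat = (matrix[a]'ha).length + (W.toNat - (matrix[a]'ha).length) by omega,
    List.range_add, List.countP_append]
  have h2 : ((List.range (W.toNat - (matrix[a]'ha).length)).map ((matrix[a]'ha).length + ·)).countP
      (fun jn => decide (jn < (matrix[a]'ha).length ∧ jn < (matrix[b]'hb).length ∧
        (matrix[a]'ha).getD jn 0 = (matrix[b]'hb).getD jn 0)) = 0 := by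
    rw [List.countP_eq_zero]
    intro x hx
    rcases List.mem_map.mp hx with ⟨k, -, rfl⟩
    simp only [decide_eq_true_eq]
    rintro ⟨hlt, -, -⟩
    omega
  rw [h2, Nat.add_zero]
  apply List.countP_congr
  intro i hi
  have hilt : i < (matrix[a]'ha).length := List.mem_range.mp hi
  simp only [decide_eq_true_eq]
  constructor
  · rintro ⟨-, h4, h5⟩; exact ⟨h4, h5⟩
  · rintro ⟨h4, h5⟩; exact ⟨hilt, h4, h5⟩

lemma rowSim_eq (r1 r2 : List Int) :
    get_rows_similarity r1 r2 =
      ((List.range r1.length).countP (fun i => decide (i < r2.length ∧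
        r1.getD i 0 = r2.getD i 0)) : Int) := by
  unfold get_rows_similarity
  rw [PySem.List.len_eq]
  simp only [PySem.List.len_eq, PySem.List.pyRange_one, Int.sub_zero, Int.toNat_natCast]
  rw [List.filter_map, List.length_map, List.length_map, ← List.countP_eq_length_filter]
  congr 1
  apply List.countP_congr
  intro i hi
  have h1 : i < r1.length := List.mem_range.mp hi
  simp only [Function.comp_apply, zero_add, PySem.List.pyGet?_natCast]
  rw [List.getElem?_eq_getElem h1]
  by_cases h2 : i < r2.length
  · rw [List.getElem?_eq_getElem h2]
    simp [h1, h2]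
  · rw [List.getElem?_eq_none (by omega)]
    simp [h2]

lemma mem_pairsCanon (g : List Int) (hg : g.Pairwise (· < ·)) (y : Int × Int)
    (hy : y ∈ pairsCanon g) : y.1 ∈ g ∧ y.2 ∈ g ∧ y.1 < y.2 := by
  have hc := count_pairsCanon g hg y.1 y.2
  have hpos : 0 < (pairsCanon g).count (y.1, y.2) :=
    List.count_pos_iff.mpr (by simpa using hy)
  by_contra h
  rw [if_neg h] at hc
  omega

lemma keys_foldl_mStep (l : List (Int × Int)) (d : PySem.Dict (Int × Int) Int) :
    (l.foldl mStep d).keys = PySem.Set.update d.keys l :=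
  PySem.Dict.keys_foldl_modify l 0 (fun _ _ => fun v => v + 1) d

lemma getD_foldl_mStep (l : List (Int × Int)) (d : PySem.Dict (Int × Int) Int) (v : Int × Int) :
    (l.foldl mStep d).getD v 0 = d.getD v 0 + (l.count v : Int) :=
  PySem.Dict.getD_foldl_modify_add_one l d v

lemma KL_self (m : Nat) : KL ((m : Int) + 1) ((m : Int) + 1) = KL (m : Int) ((m : Int) + 1) := by
  unfold KL
  rw [PySem.List.pyRange_one_succ_right (by positivity), List.flatMap_append]
  simp [PySem.List.pyRange_one_eq_nil (le_refl ((m : Int) + 1))]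

lemma itemsA_eq (matrix : List (List Int)) :
    ((PySem.List.pyRange 0 ((matrix.length : Int) - 1) 1).foldl (fun d i1 =>
      (PySem.List.pyRange (i1 + 1) (matrix.length : Int) 1).foldl (fun d i2 =>
        d.insert (i1, i2)
          (get_rows_similarity (PySem.List.pyGetD matrix i1 []) (PySem.List.pyGetD matrix i2 [])))
        d)
      PySem.Dict.empty).items
    = (KL (matrix.length : Int) (matrix.length : Int)).map (fun k =>
        (k, get_rows_similarity (PySem.List.pyGetD matrix k.1 []) (PySem.List.pyGetD matrix k.2 []))) := by
  rcases hN : matrix.length with _ | m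
  · rw [show ((0 : Nat) : Int) - 1 = -1 by norm_num,
      PySem.List.pyRange_one_eq_nil (by norm_num : (-1 : Int) ≤ 0)]
    have hKL : KL ((0 : Nat) : Int) ((0 : Nat) : Int) = [] := by
      unfold KL
      rw [PySem.List.pyRange_one_eq_nil (by norm_num)]
      rfl
    rw [hKL]
    rfl
  · rw [show (((m + 1 : Nat)) : Int) - 1 = ((m : Int)) by push_cast; ring]
    rw [nested_items ((m + 1 : Nat) : Int)
      (fun i1 i2 => get_rows_similarity (PySem.List.pyGetD matrix i1 []) (PySem.List.pyGetD matrix i2 [])) m]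
    rw [show (((m + 1 : Nat)) : Int) = (m : Int) + 1 by push_cast; ring, KL_self]

lemma mem_colEvents_KL (matrix : List (List Int)) (j : Int) (y : Int × Int)
    (hy : y ∈ colEvents matrix j) : y ∈ KL (matrix.length : Int) (matrix.length : Int) := by
  unfold colEvents at hy
  rcases List.mem_flatMap.mp hy with ⟨g, hg, hyg⟩
  rw [values_groupsD] at hg
  rcases List.mem_map.mp hg with ⟨v, -, rfl⟩
  rw [getD_groupsD] at hyg
  rcases mem_pairsCanon _ (group_pairwise matrix j v) y hyg with ⟨h1, h2, h3⟩
  rw [mem_group] at h1 h2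
  rcases h1 with ⟨k1, hk1, e1, -, -⟩
  rcases h2 with ⟨k2, hk2, e2, -, -⟩
  rw [mem_KL]
  refine ⟨by omega, by omega, h3, by omega⟩

theorem ab_eq (matrix : List (List Int)) : get_similarity matrix = get_similarity_alt matrix := by
  simp only [get_similarity, get_similarity_alt]
  rw [show PySem.List.len matrix = ((matrix.length : Nat) : Int) from by simp [PySem.List.len_eq]]
  refine congrArg (List.map _) ?_
  rw [itemsA_eq]
  have hbody : ∀ (acc : PySem.Dict (Int × Int) Int) (j : Int),
      j ∈ PySem.List.pyRange 0 (matrix.foldl (fun w row => max w (PySem.List.len row)) 0) 1 →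
      (List.foldl (fun s idxs => bumpPairs s idxs) acc
        ((List.foldl (fun g p =>
          if j < PySem.List.len p.2 then
            g.modify (PySem.List.pyGetD p.2 j 0) [] (· ++ [p.1])
          else g) PySem.Dict.empty (PySem.List.enumerate matrix)).values))
      = (colEvents matrix j).foldl mStep acc := by
    intro acc j _
    show ((groupsD matrix j).values.foldl (fun s idxs => bumpPairs s idxs) acc) = _
    unfold colEvents
    rw [List.foldl_flatMap]
    exact PySem.List.foldl_congr_mem _ _ _ _ (fun acc x _ => bumpPairs_eq x acc)
  rw [PySem.List.foldl_congr_mem _ _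
    (fun (sim : PySem.Dict (Int × Int) Int) (j : Int) => (colEvents matrix j).foldl mStep sim)
    _ hbody, ← List.foldl_flatMap]
  have hS0items := nested_items ((matrix.length : Nat) : Int) (fun _ _ => (0 : Int)) matrix.length
  have hS0keys : ((PySem.List.pyRange 0 ((matrix.length : Nat) : Int) 1).foldl (fun d i1 =>
      (PySem.List.pyRange (i1 + 1) ((matrix.length : Nat) : Int) 1).foldl
        (fun d i2 => d.insert (i1, i2) (0 : Int)) d) PySem.Dict.empty).keys
      = KL ((matrix.length : Nat) : Int) ((matrix.length : Nat) : Int) := by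
    simp only [PySem.Dict.keys, hS0items, List.map_map]
    exact List.map_id _
  have hS0nodup : ((PySem.List.pyRange 0 ((matrix.length : Nat) : Int) 1).foldl (fun d i1 =>
      (PySem.List.pyRange (i1 + 1) ((matrix.length : Nat) : Int) 1).foldl
        (fun d i2 => d.insert (i1, i2) (0 : Int)) d) PySem.Dict.empty).keys.Nodup := by
    rw [hS0keys]; exact KL_nodup _ _
  have hkeysF : (((PySem.List.pyRange 0
        (matrix.foldl (fun w row => max w (PySem.List.len row)) 0) 1).flatMap
        (colEvents matrix)).foldl mStep
        ((PySem.List.pyRange 0 ((matrix.length : Nat) : Int) 1).foldl (fun d i1 =>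
          (PySem.List.pyRange (i1 + 1) ((matrix.length : Nat) : Int) 1).foldl
            (fun d i2 => d.insert (i1, i2) (0 : Int)) d) PySem.Dict.empty)).keys
      = KL ((matrix.length : Nat) : Int) ((matrix.length : Nat) : Int) := by
    rw [keys_foldl_mStep, hS0keys, PySem.Set.update_eq_append_filter]
    have : (PySem.Set.ofList ((PySem.List.pyRange 0
        (matrix.foldl (fun w row => max w (PySem.List.len row)) 0) 1).flatMap
        (colEvents matrix))).filter
        (fun y => !PySem.Set.contains (KL ((matrix.length : Nat) : Int) ((matrix.length : Nat) : Int)) y) = [] := by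
      rw [List.filter_eq_nil_iff]
      intro y hy
      have hyE := (PySem.Set.mem_ofList _ _).mp hy
      rcases List.mem_flatMap.mp hyE with ⟨j, -, hyc⟩
      have := mem_colEvents_KL matrix j y hyc
      simp [this]
    rw [this, List.append_nil]
  have hnodupF := hkeysF ▸ KL_nodup ((matrix.length : Nat) : Int) ((matrix.length : Nat) : Int)
  rw [PySem.Dict.items_eq_map_keys _ hnodupF 0, hkeysF]
  apply List.map_congr_left
  intro k hk
  rcases (mem_KL _ _ k).mp hk with ⟨h0, h1, h2, h3⟩
  have ha : k.1 = ((k.1.toNat : Nat) : Int) := by omega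
  have hb : k.2 = ((k.2.toNat : Nat) : Int) := by omega
  have haN : k.1.toNat < matrix.length := by omega
  have hbN : k.2.toNat < matrix.length := by omega
  have hab : k.1.toNat < k.2.toNat := by omega
  refine congrArg (Prod.mk k) ?_
  rw [getD_foldl_mStep]
  have hgd0 : ((PySem.List.pyRange 0 ((matrix.length : Nat) : Int) 1).foldl (fun d i1 =>
      (PySem.List.pyRange (i1 + 1) ((matrix.length : Nat) : Int) 1).foldl
        (fun d i2 => d.insert (i1, i2) (0 : Int)) d) PySem.Dict.empty).getD k 0 = 0 := by
    exact PySem.Dict.getD_of_mem_items _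
      (by rw [hS0items]; exact List.mem_map.mpr ⟨k, hk, rfl⟩) hS0nodup 0
  rw [hgd0, zero_add]
  conv_rhs => rw [show k = (((k.1.toNat : Nat) : Int), ((k.2.toNat : Nat) : Int)) from by
    rw [← ha, ← hb]]
  rw [count_total matrix k.1.toNat k.2.toNat haN hbN hab]
  conv_lhs => rw [ha, hb]
  rw [PySem.List.pyGetD_natCast, PySem.List.pyGetD_natCast,
    List.getD_eq_getElem matrix [] haN, List.getD_eq_getElem matrix [] hbN, rowSim_eq]

-- ===== VERDICT (by name: the statement is the Claim_ definition above) =====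
theorem get_similarity_spec : Claim_equal_get_similarity := by
  intro matrix _ _
  unfold Spec_get_similarity
  exact ab_eq matrix
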